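-- pv_equiv track=rewrite | github.com/laughingclouds/Scrapia-World | scracli.py | _get_chapter_number_list
-- ===== SOURCE A (Python) =====
-- def _get_chapter_number_list(chapter_list: list[str]) -> list[int]:
--     """Returns a sorted (asc) list of all the chapter numbers in the file. We can later check and see whether
--     all the chapters are present in ascending order and whether any chapter is missing or not."""
--
--     def _get_number_from_string(string_: str) -> int:
--         """A function to get a number from a string, for example, getting a chapter number from the chapter title."""
--         number_as_str: str = ''
--         was_prev_element_digit: bool = False
--         for element in string_:
--             if element.isdigit():
--                 number_as_str += element
--                 was_prev_element_digit = True
--             elif not(element.isdigit()) and was_prev_element_digit: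
--                 return int(number_as_str)
--             else:
--                 continue
--         return int(number_as_str)
--
--     sorted_chapter_list: list[int] = [_get_number_from_string(chapter_title) for chapter_title in chapter_list]
--     sorted_chapter_list.sort()
--     return sorted_chapter_list
-- ===== SOURCE B (Python) =====
-- def _get_chapter_number_list(chapter_list: list[str]) -> list[int]:
--     """Two-pointer re-implementation: locate the first digit run by index
--     (skip phase, then extend phase) and int() the slice, instead of A's
--     per-character accumulator state machine."""
--
--     def _get_number_from_string(string_: str) -> int:
--         n = len(string_)
--         i = 0
--         while i < n and not string_[i].isdigit():
--             i += 1
--         j = i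
--         while j < n and string_[j].isdigit():
--             j += 1
--         return int(string_[i:j])
--
--     return sorted(map(_get_number_from_string, chapter_list))
-- ===== Notes on version B (the rewrite author's own statement) =====
-- stated objective: alternative
-- what changed: The per-character accumulator state machine (flag + string built char by char, early return) is replaced by a two-pointer scan: skip to the first digit by index, extend over the digit run, then int() one slice; the sort stays.
import Mathlib
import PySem

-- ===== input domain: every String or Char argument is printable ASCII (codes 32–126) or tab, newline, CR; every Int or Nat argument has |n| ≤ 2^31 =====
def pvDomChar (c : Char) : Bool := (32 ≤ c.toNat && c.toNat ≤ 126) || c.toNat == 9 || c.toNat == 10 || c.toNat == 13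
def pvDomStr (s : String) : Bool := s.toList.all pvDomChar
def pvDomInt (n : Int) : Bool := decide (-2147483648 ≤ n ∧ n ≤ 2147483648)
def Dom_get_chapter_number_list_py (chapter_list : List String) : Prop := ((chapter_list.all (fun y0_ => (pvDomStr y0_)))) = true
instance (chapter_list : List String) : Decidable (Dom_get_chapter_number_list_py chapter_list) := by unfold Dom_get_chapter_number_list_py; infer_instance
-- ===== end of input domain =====

-- B replaces A's one-pass accumulator state machine by a two-pointer scan (skip
-- non-digits, extend over digits, int() the slice): alternative decomposition, same cost.

-- ===== PORT A =====
-- the inner loop of _get_number_from_string: state = (number_as_str, was_prev_element_digit);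
-- int('') raises ValueError in Python (excluded by Pre_): ofChars? [] = none, .getD 0 is a placeholder there
def pvGetNumA : List Char → List Char → Bool → Int
  | [], acc, _ => (PySem.Int.ofChars? acc).getD 0
  | c :: rest, acc, wasPrev =>
    if PySem.Chars.isdigit c then pvGetNumA rest (acc ++ [c]) true
    else if wasPrev then (PySem.Int.ofChars? acc).getD 0
    else pvGetNumA rest acc wasPrev

def get_chapter_number_list_py (chapter_list : List String) : List Int :=
  PySem.List.sorted (chapter_list.map (fun t => pvGetNumA t.toList [] false)) (fun x => x) false

-- ===== PORT B =====
-- first while loop of Source B: advance i past non-digits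
def pvSkip (cs : List Char) (i : Nat) : Nat :=
  if h : i < cs.length then
    if PySem.Chars.isdigit cs[i] then i else pvSkip cs (i + 1)
  else i
termination_by cs.length - i

-- second while loop of Source B: advance j over digits
def pvDigitEnd (cs : List Char) (j : Nat) : Nat :=
  if h : j < cs.length then
    if PySem.Chars.isdigit cs[j] then pvDigitEnd cs (j + 1) else j
  else j
termination_by cs.length - j

def pvGetNumB (s : String) : Int :=
  let cs := s.toList
  let i := pvSkip cs 0
  let j := pvDigitEnd cs i
  (PySem.Int.ofChars? (PySem.List.slice cs (some (i : Int)) (some (j : Int)))).getD 0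

def get_chapter_number_list_py_alt (chapter_list : List String) : List Int :=
  PySem.List.sorted (chapter_list.map pvGetNumB) (fun x => x) false

-- ===== PRECONDITION & SPEC =====
-- Pre_ excludes strings with no ASCII digit: there Python A (and B) raises ValueError from int('')
def Pre_get_chapter_number_list_py (chapter_list : List String) : Prop :=
  chapter_list.all (fun s => s.toList.any PySem.Chars.isdigit) = true
instance (chapter_list : List String) : Decidable (Pre_get_chapter_number_list_py chapter_list) := by
  unfold Pre_get_chapter_number_list_py; infer_instance
def pvWitness_get_chapter_number_list_py : List String := ["Chapter 12: Dawn", "chapter 3", "7"]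

def Spec_get_chapter_number_list_py (chapter_list : List String) (out : List Int) : Prop := out = get_chapter_number_list_py_alt chapter_list
instance (chapter_list : List String) (out : List Int) : Decidable (Spec_get_chapter_number_list_py chapter_list out) := by unfold Spec_get_chapter_number_list_py; infer_instance

-- ===== CLAIM (what is proved, stated in full; the proofs are below) =====
def Claim_equal_get_chapter_number_list_py : Prop := ∀ (chapter_list : List String), Dom_get_chapter_number_list_py chapter_list → Pre_get_chapter_number_list_py chapter_list → Spec_get_chapter_number_list_py chapter_list (get_chapter_number_list_py chapter_list)

-- ===== LEMMAS AND PROOFS =====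

-- A's loop in the collecting state appends exactly the leading digit run
theorem pvGetNumA_true (cs : List Char) : ∀ acc,
    pvGetNumA cs acc true
      = (PySem.Int.ofChars? (acc ++ cs.takeWhile PySem.Chars.isdigit)).getD 0 := by
  induction cs with
  | nil => intro acc; simp [pvGetNumA]
  | cons c rest ih =>
    intro acc
    by_cases h : PySem.Chars.isdigit c
    · simp [pvGetNumA, h, ih]
    · simp [pvGetNumA, h]

-- A's loop from the initial state reads the first digit run
theorem pvGetNumA_spec (cs : List Char) :
    pvGetNumA cs [] false
      = (PySem.Int.ofChars?
          ((cs.dropWhile (fun c => !PySem.Chars.isdigit c)).takeWhile PySem.Chars.isdigit)).getD 0 := by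
  induction cs with
  | nil => simp [pvGetNumA]
  | cons c rest ih =>
    by_cases h : PySem.Chars.isdigit c
    · simp [pvGetNumA, h, pvGetNumA_true]
    · simp [pvGetNumA, h, ih]

-- B's first while loop lands on the first digit (drop form), staying in bounds
theorem pvSkip_spec (cs : List Char) : ∀ i, i ≤ cs.length →
    i ≤ pvSkip cs i ∧ pvSkip cs i ≤ cs.length ∧
      cs.drop (pvSkip cs i) = (cs.drop i).dropWhile (fun c => !PySem.Chars.isdigit c) := by
  intro i hi
  induction hn : cs.length - i generalizing i with
  | zero =>
    have : i = cs.length := by omega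
    subst this
    rw [pvSkip]
    simp
  | succ n ih =>
    have hlt : i < cs.length := by omega
    rw [pvSkip]
    simp only [hlt, dif_pos]
    by_cases hd : PySem.Chars.isdigit cs[i]
    · simp only [hd, if_pos]
      refine ⟨le_refl _, le_of_lt hlt, ?_⟩
      rw [List.drop_eq_getElem_cons hlt, List.dropWhile_cons]
      simp [hd]
    · simp only [hd, if_neg, Bool.false_eq_true, not_false_iff]
      obtain ⟨h1, h2, h3⟩ := ih (i + 1) (by omega) (by omega)
      refine ⟨by omega, h2, ?_⟩
      rw [h3, List.drop_eq_getElem_cons hlt, List.dropWhile_cons]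
      simp [hd]

-- B's second while loop: the slice [j, pvDigitEnd cs j) is the digit run at j
theorem pvDigitEnd_spec (cs : List Char) : ∀ j, j ≤ cs.length →
    j ≤ pvDigitEnd cs j ∧ pvDigitEnd cs j ≤ cs.length ∧
      (cs.drop j).take (pvDigitEnd cs j - j) = (cs.drop j).takeWhile PySem.Chars.isdigit := by
  intro j hj
  induction hn : cs.length - j generalizing j with
  | zero =>
    have : j = cs.length := by omega
    subst this
    rw [pvDigitEnd]
    simp
  | succ n ih =>
    have hlt : j < cs.length := by omega
    rw [pvDigitEnd]
    simp only [hlt, dif_pos]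
    by_cases hd : PySem.Chars.isdigit cs[j]
    · simp only [hd, if_pos]
      obtain ⟨h1, h2, h3⟩ := ih (j + 1) (by omega) (by omega)
      refine ⟨by omega, h2, ?_⟩
      rw [List.drop_eq_getElem_cons hlt, List.takeWhile_cons]
      have : pvDigitEnd cs (j + 1) - j = (pvDigitEnd cs (j + 1) - (j + 1)) + 1 := by omega
      rw [this, List.take_succ_cons, h3]
      simp [hd]
    · simp only [hd, if_neg, Bool.false_eq_true, not_false_iff]
      refine ⟨le_refl _, le_of_lt hlt, ?_⟩
      rw [List.drop_eq_getElem_cons hlt, List.takeWhile_cons]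
      simp [hd]

-- the two parsers agree on every string
theorem pvGetNum_eq (s : String) : pvGetNumA s.toList [] false = pvGetNumB s := by
  obtain ⟨hi1, hi2, hi3⟩ := pvSkip_spec s.toList 0 (Nat.zero_le _)
  obtain ⟨hj1, hj2, hj3⟩ := pvDigitEnd_spec s.toList (pvSkip s.toList 0) hi2
  show _ = (PySem.Int.ofChars? (PySem.List.slice s.toList
      (some ((pvSkip s.toList 0 : Nat) : Int))
      (some ((pvDigitEnd s.toList (pvSkip s.toList 0) : Nat) : Int)))).getD 0
  rw [pvGetNumA_spec, PySem.List.slice_natCast, hj3, hi3]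
  simp

-- ===== VERDICT (by name: the statement is the Claim_ definition above) =====
theorem get_chapter_number_list_py_spec : Claim_equal_get_chapter_number_list_py := by
  intro chapter_list _ _
  unfold Spec_get_chapter_number_list_py get_chapter_number_list_py get_chapter_number_list_py_alt
  congr 1
  exact List.map_congr_left fun s _ => pvGetNum_eq s
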